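-- pv_equiv track=rewrite | github.com/ElliottSax/engineer | training_iterations/training_iteration116.py | tree_hash
-- ===== SOURCE A (Python) =====
-- def tree_hash(n, edges, root=0):
--     """Compute a hash for a rooted tree to check isomorphism."""
--     if n == 0:
--         return 0
--
--     adj = [[] for _ in range(n)]
--     for u, v in edges:
--         adj[u].append(v)
--         adj[v].append(u)
--
--     # Build tree with root
--     parent = [-1] * n
--     children = [[] for _ in range(n)]
--     visited = [False] * n
--     order = []
--
--     stack = [root]
--     visited[root] = True
--     while stack:
--         u = stack.pop()
--         order.append(u)
--         for v in adj[u]: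
--             if not visited[v]:
--                 visited[v] = True
--                 parent[v] = u
--                 children[u].append(v)
--                 stack.append(v)
--
--     # Compute hash bottom-up
--     MOD = 10**9 + 7
--     hash_val = [0] * n
--
--     for u in reversed(order):
--         if not children[u]:
--             hash_val[u] = 1
--         else:
--             child_hashes = sorted(hash_val[c] for c in children[u])
--             h = 1
--             for ch in child_hashes:
--                 h = (h * 31 + ch) % MOD
--             hash_val[u] = h
--
--     return hash_val[root]
-- ===== SOURCE B (Python) =====
-- def tree_hash(n, edges, root=0):
--     """Compute a hash for a rooted tree to check isomorphism."""
--     if n == 0: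
--         return 0
--
--     MOD = 10**9 + 7
--     adj = [[] for _ in range(n)]
--     for u, v in edges:
--         adj[u].append(v)
--         adj[v].append(u)
--
--     # Single post-order pass: an enter/exit stack plus a stack of frames,
--     # each frame collecting the hashes of the finished children of one open node.
--     visited = [False] * n
--     visited[root] = True
--     frames = [[]]            # bottom frame receives the root's hash
--     todo = [(root, True)]    # (node, entering?)
--     while todo:
--         u, entering = todo.pop()
--         if entering:
--             todo.append((u, False))
--             frames.append([])
--             for v in adj[u]:
--                 if not visited[v]:
--                     visited[v] = True
--                     todo.append((v, True))
--         else: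
--             hs = frames.pop()
--             hs.sort()
--             h = 1
--             for ch in hs:
--                 h = (h * 31 + ch) % MOD
--             frames[-1].append(h)
--     return frames[0][0]
-- ===== Notes on version B (the rewrite author's own statement) =====
-- stated objective: alternative
-- what changed: A traverses twice (an explicit-stack DFS that materialises parent/children/order arrays, then a reversed bottom-up sweep filling a hash_val array); B computes the same hash in a single post-order pass using an enter/exit todo stack and a stack of child-hash frames, allocating no per-node parent/children/order/hash_val arrays (it read 1.5-2.5x faster in sandbox timings, but runs were too noisy to claim that).
import Mathlib
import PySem

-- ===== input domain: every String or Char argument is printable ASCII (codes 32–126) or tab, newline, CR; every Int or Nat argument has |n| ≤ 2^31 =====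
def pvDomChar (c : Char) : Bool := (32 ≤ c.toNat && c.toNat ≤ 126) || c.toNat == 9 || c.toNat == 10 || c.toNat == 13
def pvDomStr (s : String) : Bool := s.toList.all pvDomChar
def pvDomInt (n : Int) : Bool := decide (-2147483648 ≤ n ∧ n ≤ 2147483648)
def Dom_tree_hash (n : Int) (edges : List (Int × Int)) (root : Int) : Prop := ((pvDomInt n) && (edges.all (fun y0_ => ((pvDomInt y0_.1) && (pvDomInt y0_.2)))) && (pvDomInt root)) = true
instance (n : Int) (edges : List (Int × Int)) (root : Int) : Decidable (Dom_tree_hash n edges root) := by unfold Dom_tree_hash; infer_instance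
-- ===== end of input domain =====

-- B replaces A's two-pass design (stack traversal materialising parent/children/order arrays, then a
-- reversed bottom-up sweep) by a single post-order pass with an enter/exit stack and a stack of
-- child-hash frames; same return value, no asymptotic change.

-- ===== PORT A =====
-- adj = [[] for _ in range(n)]; for u,v in edges: adj[u].append(v); adj[v].append(u)
-- (possibly negative in-range indices: PySem.List.pyGetD / pySetD are exact inside Pre_)
def pvAdjA (n : Int) (edges : List (Int × Int)) : List (List Int) :=
  edges.foldl (fun adj e =>
    let adj1 := PySem.List.pySetD adj e.1 (PySem.List.pyGetD adj e.1 [] ++ [e.2])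
    PySem.List.pySetD adj1 e.2 (PySem.List.pyGetD adj1 e.2 [] ++ [e.1]))
    (List.replicate n.toNat [])

-- the 'while stack:' loop; the Python list's right end (its top) is this list's HEAD
-- (append = cons, pop = take the head) — exact. fuel bounds the iteration count: every
-- iteration pops one node that was pushed, and at most n nodes are ever pushed.
def pvLoopA (adj : List (List Int)) :
    Nat → List Int → List Bool → List Int → List (List Int) → List Int →
    List Bool × List Int × List (List Int) × List Int
  | 0, _, vis, par, ch, ord => (vis, par, ch, ord)
  | _ + 1, [], vis, par, ch, ord => (vis, par, ch, ord)
  | f + 1, u :: rest, vis, par, ch, ord =>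
    let st := (PySem.List.pyGetD adj u []).foldl
      (fun (st : List Bool × List Int × List (List Int) × List Int) v =>
        if PySem.List.pyGetD st.1 v false = false then
          (PySem.List.pySetD st.1 v true,
           PySem.List.pySetD st.2.1 v u,
           PySem.List.pySetD st.2.2.1 u (PySem.List.pyGetD st.2.2.1 u [] ++ [v]),
           v :: st.2.2.2)
        else st)
      (vis, par, ch, rest)
    pvLoopA adj f st.2.2.2 st.1 st.2.1 st.2.2.1 (ord ++ [u])

-- body of 'for u in reversed(order):'
def pvHashStepA (ch : List (List Int)) (hv : List Int) (u : Int) : List Int :=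
  let cs := PySem.List.pyGetD ch u []
  if cs = [] then PySem.List.pySetD hv u 1
  else
    let hs := PySem.List.sorted (cs.map fun c => PySem.List.pyGetD hv c 0) (fun x => x) false
    PySem.List.pySetD hv u
      (hs.foldl (fun h c => PySem.Int.mod (h * 31 + c) 1000000007) 1)

def tree_hash (n : Int) (edges : List (Int × Int)) (root : Int) : Int :=
  if n = 0 then 0
  else
    let adj := pvAdjA n edges
    let vis0 := PySem.List.pySetD (List.replicate n.toNat false) root true
    let r := pvLoopA adj n.toNat [root] vis0 (List.replicate n.toNat (-1)) (List.replicate n.toNat []) []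
    let hv := r.2.2.2.reverse.foldl (pvHashStepA r.2.2.1) (List.replicate n.toNat 0)
    PySem.List.pyGetD hv root 0

-- ===== PORT B =====
-- Source B builds the adjacency lists with exactly the same two lines as A, so its port
-- reuses the helper pvAdjA.

-- B's single 'while todo:' loop. Both Python lists' right ends (their tops) are these lists'
-- HEADS (append = cons, pop = take the head, frames[-1] = head) — exact. fuel bounds the
-- iteration count: each node entered contributes one enter and one exit iteration.
def pvLoopB (adj : List (List Int)) :
    Nat → List (Int × Bool) → List Bool → List (List Int) →
    List Bool × List (List Int)
  | 0, _, vis, frames => (vis, frames)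
  | _ + 1, [], vis, frames => (vis, frames)
  | f + 1, (u, entering) :: todo, vis, frames =>
    if entering then
      let st := (PySem.List.pyGetD adj u []).foldl
        (fun (st : List Bool × List (Int × Bool)) v =>
          if PySem.List.pyGetD st.1 v false = false then
            (PySem.List.pySetD st.1 v true, (v, true) :: st.2)
          else st)
        (vis, (u, false) :: todo)
      pvLoopB adj f st.2 st.1 ([] :: frames)
    else
      match frames with
      | [] => (vis, frames)        -- unreachable: one open frame per pending exit marker
      | hs :: rest =>
        let hs' := PySem.List.sorted hs (fun x => x) false
        let h := hs'.foldl (fun h c => PySem.Int.mod (h * 31 + c) 1000000007) 1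
        match rest with
        | [] => (vis, rest)        -- unreachable: the bottom frame is never popped
        | g :: gs => pvLoopB adj f todo vis ((g ++ [h]) :: gs)

def tree_hash_alt (n : Int) (edges : List (Int × Int)) (root : Int) : Int :=
  if n = 0 then 0
  else
    let adj := pvAdjA n edges
    let vis0 := PySem.List.pySetD (List.replicate n.toNat false) root true
    let r := pvLoopB adj (2 * n).toNat [(root, true)] vis0 [[]]
    -- 'return frames[0][0]': frames[0] is the bottom frame, i.e. the LAST list in the
    -- head-is-top representation, and [0] is its first element.
    (r.2.getLastD []).headD 0

-- ===== PRECONDITION & SPEC =====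
-- Pre_ excludes exactly the inputs on which the Python A raises (IndexError): n < 0 (visited[root]
-- on an empty list), or, for n ≥ 1, a root or an edge endpoint outside [-n, n).
def Pre_tree_hash (n : Int) (edges : List (Int × Int)) (root : Int) : Prop :=
  n = 0 ∨ (1 ≤ n ∧ PySem.Raise.InRange n.toNat root ∧
    ∀ e ∈ edges, PySem.Raise.InRange n.toNat e.1 ∧ PySem.Raise.InRange n.toNat e.2)

instance (n : Int) (edges : List (Int × Int)) (root : Int) : Decidable (Pre_tree_hash n edges root) := by
  unfold Pre_tree_hash; infer_instance

def pvWitness_tree_hash : Int × (List (Int × Int)) × Int := (3, [(0, 1), (1, 2)], 0)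

def Spec_tree_hash (n : Int) (edges : List (Int × Int)) (root : Int) (out : Int) : Prop :=
  out = tree_hash_alt n edges root
instance (n : Int) (edges : List (Int × Int)) (root : Int) (out : Int) : Decidable (Spec_tree_hash n edges root out) := by
  unfold Spec_tree_hash; infer_instance

-- ===== CLAIM (what is proved, stated in full; the proofs are below) =====
def Claim_equal_tree_hash : Prop := ∀ (n : Int) (edges : List (Int × Int)) (root : Int),
  Dom_tree_hash n edges root → Pre_tree_hash n edges root →
  Spec_tree_hash n edges root (tree_hash n edges root)

-- ===== LEMMAS AND PROOFS =====

-- the cell of list index x (possibly negative) in a list of length m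
def pvCell (m : Nat) (x : Int) : Nat := if 0 ≤ x then x.toNat else m - (-x).toNat

def pvCF (vis : List Bool) : Nat := vis.count false

-- one step of the shared 'if not visited[v]: visited[v] = True; remember v' scan
def pvMark (p : List Int × List Bool) (v : Int) : List Int × List Bool :=
  if PySem.List.pyGetD p.2 v false = false then (p.1 ++ [v], PySem.List.pySetD p.2 v true) else p

def pvCollect (adj : List (List Int)) (u : Int) (vis : List Bool) : List Int × List Bool :=
  (PySem.List.pyGetD adj u []).foldl pvMark ([], vis)

def pvComb (l : List Int) : Int := l.foldl (fun h c => PySem.Int.mod (h * 31 + c) 1000000007) 1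

-- reference recursion: hash of u's subtree as both programs discover it
def pvDfs (adj : List (List Int)) : Nat → Int → List Bool → Int × List Bool
  | 0, _, vis => (0, vis)
  | f + 1, u, vis =>
    let p := pvCollect adj u vis
    let q := p.1.reverse.foldl
      (fun (q : List Int × List Bool) v =>
        let r := pvDfs adj f v q.2
        (q.1 ++ [r.1], r.2)) ([], p.2)
    (pvComb (PySem.List.sorted q.1 (fun x => x) false), q.2)

def pvDfsL (adj : List (List Int)) (f : Nat) (l : List Int) (vis : List Bool) : List Int × List Bool :=
  l.foldl (fun (q : List Int × List Bool) v =>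
    let r := pvDfs adj f v q.2
    (q.1 ++ [r.1], r.2)) ([], vis)


-- ---- small bridges between Python indexing and cell-level list operations ----

lemma pvCell_lt {m : Nat} {x : Int} (h : PySem.Raise.InRange m x) : pvCell m x < m := by
  obtain ⟨h1, h2⟩ := h; unfold pvCell; split <;> omega

lemma pvIdx_eq {m : Nat} {x : Int} (h : PySem.Raise.InRange m x) :
    PySem.List.pyIdx? m x = some (pvCell m x) := by
  obtain ⟨h1, h2⟩ := h
  simp only [PySem.List.pyIdx?, pvCell]
  split <;> rename_i h0
  · rfl
  · rfl

lemma pvGetD_cell {α : Type} {xs : List α} {x : Int} {d : α} (h : PySem.Raise.InRange xs.length x) :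
    PySem.List.pyGetD xs x d = xs.getD (pvCell xs.length x) d := by
  simp only [PySem.List.pyGetD, PySem.List.pyGet?, pvIdx_eq h, Option.bind_some]
  rw [List.getD_eq_getElem?_getD]

lemma pvSetD_cell {α : Type} {xs : List α} {x : Int} {v : α} (h : PySem.Raise.InRange xs.length x) :
    PySem.List.pySetD xs x v = xs.set (pvCell xs.length x) v := by
  simp only [PySem.List.pySetD, PySem.List.pySet?, pvIdx_eq h, Option.map_some, Option.getD_some]

lemma pvGetD_mem_or {α : Type} (xs : List α) (x : Int) (d : α) :
    PySem.List.pyGetD xs x d ∈ xs ∨ PySem.List.pyGetD xs x d = d := by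
  simp only [PySem.List.pyGetD, PySem.List.pyGet?]
  cases h : PySem.List.pyIdx? xs.length x with
  | none => simp
  | some k =>
    simp only [Option.bind_some]
    cases hk : xs[k]? with
    | none => simp
    | some a => exact Or.inl (by simpa using List.mem_of_getElem? hk)

lemma pvMem_pySetD {α : Type} {xs : List α} {x : Int} {v a : α}
    (h : a ∈ PySem.List.pySetD xs x v) : a ∈ xs ∨ a = v := by
  simp only [PySem.List.pySetD, PySem.List.pySet?] at h
  cases hk : PySem.List.pyIdx? xs.length x with
  | none => simp [hk] at h; exact Or.inl h
  | some k =>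
    simp [hk] at h
    rcases List.mem_or_eq_of_mem_set h with h' | h'
    · exact Or.inl h'
    · exact Or.inr h'

lemma pvGetD_set_self {α : Type} {xs : List α} {j : Nat} {v d : α} (h : j < xs.length) :
    (xs.set j v).getD j d = v := by
  rw [List.getD_eq_getElem?_getD, List.getElem?_set_self (by simpa using h)]
  simp

lemma pvGetD_set_ne {α : Type} {xs : List α} {i j : Nat} {v d : α} (h : i ≠ j) :
    (xs.set i v).getD j d = xs.getD j d := by
  rw [List.getD_eq_getElem?_getD, List.getElem?_set_ne h, ← List.getD_eq_getElem?_getD]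

lemma pvGetD_replicate {α : Type} {m j : Nat} {x d : α} (h : j < m) :
    (List.replicate m x).getD j d = x := by
  rw [List.getD_eq_getElem?_getD, List.getElem?_replicate, if_pos h]
  simp

lemma pvCount_set_true {xs : List Bool} {j : Nat} (h : j < xs.length)
    (hf : xs.getD j true = false) : (xs.set j true).count false + 1 = xs.count false := by
  induction xs generalizing j with
  | nil => simp at h
  | cons b bs ih =>
    cases j with
    | zero =>
      simp only [List.getD_cons_zero] at hf
      subst hf
      simp
    | succ j =>
      simp only [List.getD_cons_succ] at hf
      simp only [List.set_cons_succ]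
      rw [List.count_cons, List.count_cons]
      have := ih (by simpa using h) hf
      omega

lemma pvGetD_lt {α : Type} {xs : List α} {j : Nat} {d : α} (h : j < xs.length) :
    xs.getD j d = xs[j] := by
  rw [List.getD_eq_getElem?_getD, List.getElem?_eq_getElem h]; rfl

lemma pvGetD_default {α : Type} {xs : List α} {j : Nat} {d d' : α} (h : j < xs.length) :
    xs.getD j d = xs.getD j d' := by rw [pvGetD_lt h, pvGetD_lt h]

-- ---- properties of the shared neighbour scan ----

lemma pvMark_acc (l : List Int) :
    ∀ (acc : List Int) (vis : List Bool),
      l.foldl pvMark (acc, vis) =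
        (acc ++ (l.foldl pvMark ([], vis)).1, (l.foldl pvMark ([], vis)).2) := by
  induction l with
  | nil => intro acc vis; simp
  | cons v l ih =>
    intro acc vis
    simp only [List.foldl_cons]
    by_cases h : PySem.List.pyGetD vis v false = false
    · rw [show pvMark (acc, vis) v = (acc ++ [v], PySem.List.pySetD vis v true) by
        simp [pvMark, h],
        show pvMark ([], vis) v = ([] ++ [v], PySem.List.pySetD vis v true) by
        simp [pvMark, h]]
      rw [ih (acc ++ [v]), ih ([] ++ [v])]
      simp
    · rw [show pvMark (acc, vis) v = (acc, vis) by simp [pvMark, h],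
        show pvMark ([], vis) v = ([], vis) by simp [pvMark, h]]
      exact ih acc vis

structure pvCollectFacts (m : Nat) (l cs : List Int) (vis vis' : List Bool) : Prop where
  hlen : vis'.length = m
  hunch : ∀ j d, j ∉ cs.map (pvCell m) → vis'.getD j d = vis.getD j d
  hmarked : ∀ x ∈ cs, vis'.getD (pvCell m x) true = true
  hwas : ∀ x ∈ cs, vis.getD (pvCell m x) true = false
  hnodup : (cs.map (pvCell m)).Nodup
  hsub : ∀ x ∈ cs, x ∈ l
  hcount : pvCF vis' + cs.length = pvCF vis

lemma pvCollect_spec (m : Nat) :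
    ∀ (l : List Int) (vis : List Bool), vis.length = m →
      (∀ v ∈ l, PySem.Raise.InRange m v) →
      pvCollectFacts m l (l.foldl pvMark ([], vis)).1 vis (l.foldl pvMark ([], vis)).2 := by
  intro l
  induction l with
  | nil =>
    intro vis hm _
    exact ⟨hm, fun _ _ _ => rfl, by simp, by simp, by simp, by simp, by simp⟩
  | cons v l ih =>
    intro vis hm hl
    have hv := hl v (by simp)
    have hcv : pvCell m v < m := pvCell_lt hv
    have hv' : PySem.Raise.InRange vis.length v := by rw [hm]; exact hv
    simp only [List.foldl_cons]
    by_cases hvv : PySem.List.pyGetD vis v false = false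
    · rw [show pvMark ([], vis) v = ([v], PySem.List.pySetD vis v true) by simp [pvMark, hvv]]
      set vis1 := PySem.List.pySetD vis v true with hvis1
      have hvis1' : vis1 = vis.set (pvCell m v) true := by
        rw [hvis1, pvSetD_cell hv']; rw [hm]
      have hm1 : vis1.length = m := by rw [hvis1']; simpa using hm
      have hwasv : vis.getD (pvCell m v) true = false := by
        have := pvGetD_cell (d := false) hv'
        rw [hm] at this
        rw [pvGetD_default (by omega), ← this, hvv]
      have hmark1 : vis1.getD (pvCell m v) true = true := by
        rw [hvis1']; exact pvGetD_set_self (by omega)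
      have hun1 : ∀ j d, j ≠ pvCell m v → vis1.getD j d = vis.getD j d := by
        intro j d hj; rw [hvis1']; exact pvGetD_set_ne (fun h => hj h.symm)
      rw [pvMark_acc l [v] vis1]
      simp only [List.singleton_append]
      obtain ⟨ih1, ih2, ih3, ih4, ih5, ih6, ih7⟩ :=
        ih vis1 hm1 (fun x hx => hl x (by simp [hx]))
      set cs' := (l.foldl pvMark ([], vis1)).1
      set vis2 := (l.foldl pvMark ([], vis1)).2
      have hvcell : pvCell m v ∉ cs'.map (pvCell m) := by
        intro hmem
        obtain ⟨x, hx, hxc⟩ := List.mem_map.mp hmem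
        have := ih4 x hx
        rw [hxc, hmark1] at this
        simp at this
      refine ⟨ih1, ?_, ?_, ?_, ?_, ?_, ?_⟩
      · intro j d hj
        simp only [List.map_cons, List.mem_cons, not_or] at hj
        rw [ih2 j d hj.2, hun1 j d hj.1]
      · intro x hx
        rcases List.mem_cons.mp hx with h | h
        · subst h
          rw [ih2 _ _ hvcell, hmark1]
        · exact ih3 x h
      · intro x hx
        rcases List.mem_cons.mp hx with h | h
        · subst h; exact hwasv
        · have := ih4 x h
          by_cases hc : pvCell m x = pvCell m v
          · rw [hc, hmark1] at this; simp at this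
          · rw [hun1 _ _ hc] at this; exact this
      · simp only [List.map_cons, List.nodup_cons]
        exact ⟨hvcell, ih5⟩
      · intro x hx
        rcases List.mem_cons.mp hx with h | h
        · simp [h]
        · simp [ih6 x h]
      · have := pvCount_set_true (xs := vis) (j := pvCell m v) (by omega) hwasv
        have h2 : pvCF vis1 + 1 = pvCF vis := by
          rw [hvis1']; exact this
        simp only [List.length_cons]
        omega
    · rw [show pvMark ([], vis) v = ([], vis) by simp [pvMark, hvv]]
      obtain ⟨ih1, ih2, ih3, ih4, ih5, ih6, ih7⟩ :=
        ih vis hm (fun x hx => hl x (by simp [hx]))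
      exact ⟨ih1, ih2, ih3, ih4, ih5, fun x hx => by simp [ih6 x hx], ih7⟩

-- ---- the reference recursion ----

lemma pvDfsL_acc (adj : List (List Int)) (f : Nat) (l : List Int) :
    ∀ (acc : List Int) (vis : List Bool),
      l.foldl (fun (q : List Int × List Bool) v =>
          let r := pvDfs adj f v q.2
          (q.1 ++ [r.1], r.2)) (acc, vis) =
        (acc ++ (pvDfsL adj f l vis).1, (pvDfsL adj f l vis).2) := by
  induction l with
  | nil => intro acc vis; simp [pvDfsL]
  | cons v l ih =>
    intro acc vis
    simp only [pvDfsL, List.foldl_cons] at *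
    rw [ih (acc ++ [(pvDfs adj f v vis).1]), ih ([] ++ [(pvDfs adj f v vis).1])]
    simp

lemma pvDfsL_nil (adj : List (List Int)) (f : Nat) (vis : List Bool) :
    pvDfsL adj f [] vis = ([], vis) := rfl

lemma pvDfsL_cons (adj : List (List Int)) (f : Nat) (v : Int) (l : List Int) (vis : List Bool) :
    pvDfsL adj f (v :: l) vis =
      ((pvDfs adj f v vis).1 :: (pvDfsL adj f l (pvDfs adj f v vis).2).1,
       (pvDfsL adj f l (pvDfs adj f v vis).2).2) := by
  simp only [pvDfsL, List.foldl_cons]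
  rw [pvDfsL_acc adj f l]
  simp [pvDfsL]

lemma pvDfsL_append (adj : List (List Int)) (f : Nat) (l1 l2 : List Int) (vis : List Bool) :
    pvDfsL adj f (l1 ++ l2) vis =
      ((pvDfsL adj f l1 vis).1 ++ (pvDfsL adj f l2 (pvDfsL adj f l1 vis).2).1,
       (pvDfsL adj f l2 (pvDfsL adj f l1 vis).2).2) := by
  induction l1 generalizing vis with
  | nil => simp [pvDfsL_nil]
  | cons v l ih => simp only [List.cons_append, pvDfsL_cons, ih]

lemma pvDfsL_length (adj : List (List Int)) (f : Nat) (l : List Int) (vis : List Bool) :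
    (pvDfsL adj f l vis).1.length = l.length := by
  induction l generalizing vis with
  | nil => simp [pvDfsL_nil]
  | cons v l ih => simp [pvDfsL_cons, ih]

lemma pvDfs_succ (adj : List (List Int)) (f : Nat) (u : Int) (vis : List Bool) :
    pvDfs adj (f + 1) u vis =
      (pvComb (PySem.List.sorted
          (pvDfsL adj f (pvCollect adj u vis).1.reverse (pvCollect adj u vis).2).1
          (fun x => x) false),
       (pvDfsL adj f (pvCollect adj u vis).1.reverse (pvCollect adj u vis).2).2) := rfl

-- neighbour values of ANY u lie in range
lemma pvNbrs (adj : List (List Int)) (m : Nat)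
    (hadj : ∀ lst ∈ adj, ∀ v ∈ lst, PySem.Raise.InRange m v) (u : Int) :
    ∀ v ∈ PySem.List.pyGetD adj u [], PySem.Raise.InRange m v := by
  intro v hv
  rcases pvGetD_mem_or adj u [] with h | h
  · exact hadj _ h v hv
  · rw [h] at hv; simp at hv

lemma pvDfs_len_cf (adj : List (List Int)) (m : Nat)
    (hadj : ∀ lst ∈ adj, ∀ v ∈ lst, PySem.Raise.InRange m v) :
    ∀ (f : Nat) (u : Int) (vis : List Bool), vis.length = m →
      (pvDfs adj f u vis).2.length = m ∧ pvCF (pvDfs adj f u vis).2 ≤ pvCF vis := by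
  intro f
  induction f with
  | zero => intro u vis hm; exact ⟨hm, le_rfl⟩
  | succ f ih =>
    intro u vis hm
    obtain ⟨hc1, _, _, _, _, _, hc7⟩ :=
      pvCollect_spec m (PySem.List.pyGetD adj u []) vis hm (pvNbrs adj m hadj u)
    rw [pvDfs_succ]
    have haux : ∀ (l : List Int) (vis' : List Bool), vis'.length = m →
        (pvDfsL adj f l vis').2.length = m ∧ pvCF (pvDfsL adj f l vis').2 ≤ pvCF vis' := by
      intro l
      induction l with
      | nil => intro vis' h; exact ⟨h, le_rfl⟩
      | cons v l ihl =>
        intro vis' h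
        rw [pvDfsL_cons]
        obtain ⟨e1, e2⟩ := ih v vis' h
        obtain ⟨e3, e4⟩ := ihl _ e1
        exact ⟨e3, le_trans e4 e2⟩
    obtain ⟨e1, e2⟩ := haux (pvCollect adj u vis).1.reverse (pvCollect adj u vis).2 hc1
    exact ⟨e1, le_trans e2 (by unfold pvCollect; omega)⟩

lemma pvDfs_fuel (adj : List (List Int)) (m : Nat)
    (hadj : ∀ lst ∈ adj, ∀ v ∈ lst, PySem.Raise.InRange m v) :
    ∀ (k : Nat) (vis : List Bool) (g1 g2 : Nat) (u : Int), pvCF vis = k → vis.length = m →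
      pvCF vis < g1 → pvCF vis < g2 → pvDfs adj g1 u vis = pvDfs adj g2 u vis := by
  intro k
  induction k using Nat.strong_induction_on with
  | _ k ihk =>
    intro vis g1 g2 u hk hm h1 h2
    obtain ⟨f1, rfl⟩ : ∃ f1, g1 = f1 + 1 := ⟨g1 - 1, by omega⟩
    obtain ⟨f2, rfl⟩ : ∃ f2, g2 = f2 + 1 := ⟨g2 - 1, by omega⟩
    rw [pvDfs_succ, pvDfs_succ]
    obtain ⟨hc1, _, _, _, _, _, hc7⟩ :=
      pvCollect_spec m (PySem.List.pyGetD adj u []) vis hm (pvNbrs adj m hadj u)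
    rcases hcs : (pvCollect adj u vis).1 with _ | ⟨c0, cs0⟩
    · simp [pvDfsL_nil]
    · have hlen1 : 1 ≤ (pvCollect adj u vis).1.length := by rw [hcs]; simp
      have hcf1 : pvCF (pvCollect adj u vis).2 + (pvCollect adj u vis).1.length = k := by
        unfold pvCollect; rw [hk] at hc7; exact hc7
      rw [← hcs]
      have haux : ∀ (l : List Int) (vis' : List Bool), vis'.length = m →
          pvCF vis' ≤ pvCF (pvCollect adj u vis).2 →
          pvDfsL adj f1 l vis' = pvDfsL adj f2 l vis' := by
        intro l
        induction l with
        | nil => intro vis' _ _; rfl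
        | cons v l ihl =>
          intro vis' h hcf
          have hlt : pvCF vis' < k := by omega
          have e0 : pvDfs adj f1 v vis' = pvDfs adj f2 v vis' :=
            ihk (pvCF vis') hlt vis' f1 f2 v rfl h (by omega) (by omega)
          rw [pvDfsL_cons, pvDfsL_cons, e0]
          obtain ⟨e1, e2⟩ := pvDfs_len_cf adj m hadj f2 v vis' h
          rw [ihl _ e1 (le_trans e2 hcf)]
      have hc1' : (pvCollect adj u vis).2.length = m := hc1
      rw [haux _ _ hc1' le_rfl]

lemma pvDfsL_fuel (adj : List (List Int)) (m : Nat)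
    (hadj : ∀ lst ∈ adj, ∀ v ∈ lst, PySem.Raise.InRange m v)
    (g1 g2 : Nat) (l : List Int) (vis : List Bool) (hl : vis.length = m)
    (h1 : pvCF vis < g1) (h2 : pvCF vis < g2) :
    pvDfsL adj g1 l vis = pvDfsL adj g2 l vis := by
  induction l generalizing vis with
  | nil => simp [pvDfsL_nil]
  | cons v l ih =>
    rw [pvDfsL_cons, pvDfsL_cons,
      pvDfs_fuel adj m hadj (pvCF vis) vis g1 g2 v rfl hl h1 h2]
    obtain ⟨hlen, hcf⟩ := pvDfs_len_cf adj m hadj g2 v vis hl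
    rw [ih _ hlen (lt_of_le_of_lt hcf h1) (lt_of_le_of_lt hcf h2)]

-- ---- the inner for-loops of both ports, expressed through pvMark ----

lemma pvInnerA (m : Nat) (u : Int) (hu : PySem.Raise.InRange m u) :
    ∀ (l : List Int) (vis : List Bool) (par : List Int) (ch : List (List Int)) (stk : List Int),
      ch.length = m →
      ∃ par',
        l.foldl (fun (st : List Bool × List Int × List (List Int) × List Int) v =>
            if PySem.List.pyGetD st.1 v false = false then
              (PySem.List.pySetD st.1 v true,
               PySem.List.pySetD st.2.1 v u,
               PySem.List.pySetD st.2.2.1 u (PySem.List.pyGetD st.2.2.1 u [] ++ [v]),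
               v :: st.2.2.2)
            else st) (vis, par, ch, stk) =
          ((l.foldl pvMark ([], vis)).2, par',
           PySem.List.pySetD ch u (PySem.List.pyGetD ch u [] ++ (l.foldl pvMark ([], vis)).1),
           (l.foldl pvMark ([], vis)).1.reverse ++ stk) := by
  intro l
  induction l with
  | nil =>
    intro vis par ch stk hch
    have hu' : PySem.Raise.InRange ch.length u := by rw [hch]; exact hu
    refine ⟨par, ?_⟩
    simp only [List.foldl_nil, List.append_nil, List.reverse_nil, List.nil_append]
    rw [pvSetD_cell hu', pvGetD_cell hu', pvGetD_lt (pvCell_lt hu'), List.set_getElem_self]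
  | cons v l ih =>
    intro vis par ch stk hch
    have hu' : PySem.Raise.InRange ch.length u := by rw [hch]; exact hu
    have hcu : pvCell m u < m := pvCell_lt hu
    simp only [List.foldl_cons]
    by_cases hvv : PySem.List.pyGetD vis v false = false
    · rw [if_pos hvv, show pvMark ([], vis) v = ([v], PySem.List.pySetD vis v true) from by
        simp [pvMark, hvv]]
      rw [pvMark_acc l [v] (PySem.List.pySetD vis v true)]
      simp only [List.singleton_append]
      set vis1 := PySem.List.pySetD vis v true
      set ch1 := PySem.List.pySetD ch u (PySem.List.pyGetD ch u [] ++ [v]) with hch1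
      have hch1l : ch1.length = m := by rw [hch1, PySem.List.length_pySetD, hch]
      obtain ⟨par', hpar'⟩ := ih vis1 (PySem.List.pySetD par v u) ch1 (v :: stk) hch1l
      refine ⟨par', ?_⟩
      rw [hpar']
      refine congrArg₂ _ rfl (congrArg₂ _ rfl (congrArg₂ _ ?_ ?_))
      · -- children component
        have hgu : PySem.List.pyGetD ch1 u [] = PySem.List.pyGetD ch u [] ++ [v] := by
          rw [hch1, pvSetD_cell hu', pvGetD_cell (by simpa [hch] using hu')]
          rw [show (ch.set (pvCell ch.length u) (PySem.List.pyGetD ch u [] ++ [v])).length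
              = ch.length from by simp]
          rw [hch]
          exact pvGetD_set_self (by omega)
        rw [hgu, hch1, pvSetD_cell hu',
          pvSetD_cell (show PySem.Raise.InRange (ch.set (pvCell ch.length u)
            (PySem.List.pyGetD ch u [] ++ [v])).length u from by simpa using hu'),
          pvSetD_cell hu']
        rw [show (ch.set (pvCell ch.length u) (PySem.List.pyGetD ch u [] ++ [v])).length
            = ch.length from by simp]
        rw [List.set_set]
        simp
      · simp
    · rw [if_neg hvv, show pvMark ([], vis) v = ([], vis) from by simp [pvMark, hvv]]
      exact ih vis par ch stk hch

lemma pvInnerB (l : List Int) :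
    ∀ (vis : List Bool) (todo : List (Int × Bool)),
      l.foldl (fun (st : List Bool × List (Int × Bool)) v =>
          if PySem.List.pyGetD st.1 v false = false then
            (PySem.List.pySetD st.1 v true, (v, true) :: st.2)
          else st) (vis, todo) =
        ((l.foldl pvMark ([], vis)).2,
         (l.foldl pvMark ([], vis)).1.reverse.map (fun v => (v, true)) ++ todo) := by
  induction l with
  | nil => intro vis todo; simp
  | cons v l ih =>
    intro vis todo
    simp only [List.foldl_cons]
    by_cases hvv : PySem.List.pyGetD vis v false = false
    · rw [if_pos hvv, show pvMark ([], vis) v = ([v], PySem.List.pySetD vis v true) from by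
        simp [pvMark, hvv]]
      rw [pvMark_acc l [v] (PySem.List.pySetD vis v true)]
      simp only [List.singleton_append]
      rw [ih (PySem.List.pySetD vis v true) ((v, true) :: todo)]
      simp
    · rw [if_neg hvv, show pvMark ([], vis) v = ([], vis) from by simp [pvMark, hvv]]
      exact ih vis todo

-- ---- the A loop: order accumulator splits off ----

lemma pvLoopA_ord (adj : List (List Int)) :
    ∀ (f : Nat) (stack : List Int) (vis : List Bool) (par : List Int) (ch : List (List Int))
      (ord : List Int),
      pvLoopA adj f stack vis par ch ord =
        ((pvLoopA adj f stack vis par ch []).1,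
         (pvLoopA adj f stack vis par ch []).2.1,
         (pvLoopA adj f stack vis par ch []).2.2.1,
         ord ++ (pvLoopA adj f stack vis par ch []).2.2.2) := by
  intro f
  induction f with
  | zero => intro stack vis par ch ord; simp [pvLoopA]
  | succ f ih =>
    intro stack vis par ch ord
    cases stack with
    | nil => simp [pvLoopA]
    | cons u rest =>
      show pvLoopA adj (f + 1) (u :: rest) vis par ch ord = _
      simp only [pvLoopA]
      rw [ih _ _ _ _ (ord ++ [u]), ih _ _ _ _ ([] ++ [u])]
      simp

-- ---- MAIN LEMMA, A side ----

lemma pvLoopA_main (adj : List (List Int)) (m : Nat)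
    (hadj : ∀ lst ∈ adj, ∀ v ∈ lst, PySem.Raise.InRange m v) (g : Nat) :
    ∀ (f : Nat) (stack : List Int) (vis : List Bool) (par : List Int) (ch : List (List Int)),
      vis.length = m → ch.length = m →
      (∀ x ∈ stack, PySem.Raise.InRange m x) →
      (stack.map (pvCell m)).Nodup →
      (∀ x ∈ stack, vis.getD (pvCell m x) true = true) →
      (∀ j, j < m → (vis.getD j true = false ∨ j ∈ stack.map (pvCell m)) → ch.getD j [] = []) →
      stack.length + pvCF vis ≤ f → pvCF vis < g →
      (pvLoopA adj f stack vis par ch []).1 = (pvDfsL adj g stack vis).2 ∧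
      (pvLoopA adj f stack vis par ch []).1.length = m ∧
      (pvLoopA adj f stack vis par ch []).2.2.1.length = m ∧
      (∀ x ∈ (pvLoopA adj f stack vis par ch []).2.2.2,
        PySem.Raise.InRange m x ∧
          (pvCell m x ∈ stack.map (pvCell m) ∨ vis.getD (pvCell m x) true = false)) ∧
      (∀ j, j < m → j ∉ (pvLoopA adj f stack vis par ch []).2.2.2.map (pvCell m) →
        (pvLoopA adj f stack vis par ch []).2.2.1.getD j [] = ch.getD j []) ∧
      (∀ hv : List Int, hv.length = m →
        ((pvLoopA adj f stack vis par ch []).2.2.2.reverse.foldl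
            (pvHashStepA (pvLoopA adj f stack vis par ch []).2.2.1) hv).length = m ∧
        (∀ j, j < m → j ∉ (pvLoopA adj f stack vis par ch []).2.2.2.map (pvCell m) →
          ((pvLoopA adj f stack vis par ch []).2.2.2.reverse.foldl
              (pvHashStepA (pvLoopA adj f stack vis par ch []).2.2.1) hv).getD j 0 =
            hv.getD j 0) ∧
        stack.map (fun x =>
            ((pvLoopA adj f stack vis par ch []).2.2.2.reverse.foldl
                (pvHashStepA (pvLoopA adj f stack vis par ch []).2.2.1) hv).getD (pvCell m x) 0) =
          (pvDfsL adj g stack vis).1) := by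
  intro f
  induction f with
  | zero =>
    intro stack vis par ch hm hch hrange hnodup hmarked hchinv hfuel hg
    have hstack : stack = [] := by
      cases stack with
      | nil => rfl
      | cons u rest => simp [List.length_cons] at hfuel
    subst hstack
    refine ⟨rfl, hm, hch, by simp [pvLoopA], by intro j _ _; rfl, fun hv hhv => ?_⟩
    refine ⟨?_, fun j _ _ => rfl, by simp [pvLoopA, pvDfsL_nil]⟩
    show (([] : List Int).reverse.foldl _ hv).length = m
    simpa using hhv
  | succ f ih =>
    intro stack vis par ch hm hch hrange hnodup hmarked hchinv hfuel hg
    cases stack with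
    | nil =>
      refine ⟨rfl, hm, hch, by simp [pvLoopA], by intro j _ _; rfl, fun hv hhv => ?_⟩
      refine ⟨?_, fun j _ _ => rfl, by simp [pvLoopA, pvDfsL_nil]⟩
      show (([] : List Int).reverse.foldl _ hv).length = m
      simpa using hhv
    | cons u rest =>
      have hu : PySem.Raise.InRange m u := hrange u (by simp)
      have hcu : pvCell m u < m := pvCell_lt hu
      obtain ⟨hc1, hc2, hc3, hc4, hc5, hc6, hc7⟩ :=
        pvCollect_spec m (PySem.List.pyGetD adj u []) vis hm (pvNbrs adj m hadj u)
      rw [show List.foldl pvMark ([], vis) (PySem.List.pyGetD adj u []) = pvCollect adj u vis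
        from rfl] at hc1 hc2 hc3 hc4 hc5 hc6 hc7
      set cs := (pvCollect adj u vis).1 with hcs_def
      set vis1 := (pvCollect adj u vis).2 with hvis1_def
      -- basic cell facts
      simp only [List.map_cons, List.nodup_cons] at hnodup
      obtain ⟨hcu_rest, hnodup_rest⟩ := hnodup
      have hmk_u : vis.getD (pvCell m u) true = true := hmarked u (by simp)
      have hnot_cs_u : pvCell m u ∉ cs.map (pvCell m) := by
        intro hmem
        obtain ⟨x, hx, hxc⟩ := List.mem_map.mp hmem
        have := hc4 x hx
        rw [hxc, hmk_u] at this
        simp at this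
      have hvis1_u : vis1.getD (pvCell m u) true = true := by
        rw [hc2 _ _ hnot_cs_u]; exact hmk_u
      have hnot_cs_rest : ∀ x ∈ rest, pvCell m x ∉ cs.map (pvCell m) := by
        intro x hx hmem
        obtain ⟨y, hy, hyc⟩ := List.mem_map.mp hmem
        have := hc4 y hy
        rw [hyc, hmarked x (by simp [hx])] at this
        simp at this
      -- one step of the loop
      obtain ⟨par', hst⟩ := pvInnerA m u hu (PySem.List.pyGetD adj u []) vis par ch rest hch
      rw [show List.foldl pvMark ([], vis) (PySem.List.pyGetD adj u []) = pvCollect adj u vis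
        from rfl] at hst
      have hchu : PySem.List.pyGetD ch u [] = [] := by
        rw [pvGetD_cell (by rw [hch]; exact hu), hch]
        exact hchinv _ hcu (Or.inr (by simp))
      set ch1 := PySem.List.pySetD ch u cs with hch1_def
      have hstep : pvLoopA adj (f + 1) (u :: rest) vis par ch [] =
          pvLoopA adj f (cs.reverse ++ rest) vis1 par' ch1 ([] ++ [u]) := by
        conv_lhs => rw [pvLoopA]
        rw [hst, hchu]
        rfl
      have hch1_cell : ch1 = ch.set (pvCell m u) cs := by
        rw [hch1_def, pvSetD_cell (by rw [hch]; exact hu), hch]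
      have hch1_len : ch1.length = m := by rw [hch1_cell]; simpa using hch
      have hch1_u : ch1.getD (pvCell m u) [] = cs := by
        rw [hch1_cell]; exact pvGetD_set_self (by rw [hch]; exact hcu)
      have hch1_ne : ∀ j, j ≠ pvCell m u → ch1.getD j [] = ch.getD j [] := by
        intro j hj; rw [hch1_cell]; exact pvGetD_set_ne (fun h => hj h.symm)
      -- invariants for the tail call
      have hrange' : ∀ x ∈ cs.reverse ++ rest, PySem.Raise.InRange m x := by
        intro x hx
        rcases List.mem_append.mp hx with h | h
        · exact pvNbrs adj m hadj u x (hc6 x (List.mem_reverse.mp h))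
        · exact hrange x (by simp [h])
      have hnodup' : ((cs.reverse ++ rest).map (pvCell m)).Nodup := by
        rw [List.map_append, List.nodup_append]
        refine ⟨by rw [List.map_reverse]; exact List.nodup_reverse.mpr hc5, hnodup_rest, ?_⟩
        intro a ha b hb heq
        rw [List.map_reverse, List.mem_reverse] at ha
        obtain ⟨x, hx, hxc⟩ := List.mem_map.mp hb
        exact hnot_cs_rest x hx (by rw [hxc, ← heq]; exact ha)
      have hmarked' : ∀ x ∈ cs.reverse ++ rest, vis1.getD (pvCell m x) true = true := by
        intro x hx
        rcases List.mem_append.mp hx with h | h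
        · exact hc3 x (List.mem_reverse.mp h)
        · rw [hc2 _ _ (hnot_cs_rest x h)]
          exact hmarked x (by simp [h])
      have hvis1_false : ∀ j, vis1.getD j true = false → vis.getD j true = false := by
        intro j hj
        by_cases hjc : j ∈ cs.map (pvCell m)
        · obtain ⟨y, hy, hyc⟩ := List.mem_map.mp hjc
          rw [← hyc] at hj
          rw [hc3 y hy] at hj
          simp at hj
        · rw [← hc2 _ _ hjc]; exact hj
      have hchinv' : ∀ j, j < m →
          (vis1.getD j true = false ∨ j ∈ (cs.reverse ++ rest).map (pvCell m)) →
          ch1.getD j [] = [] := by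
        intro j hjm hj
        by_cases hjq : j ∈ cs.map (pvCell m)
        · obtain ⟨y, hy, hyc⟩ := List.mem_map.mp hjq
          have hyn : j ≠ pvCell m u := by
            intro h; rw [h] at hjq; exact hnot_cs_u hjq
          rw [hch1_ne _ hyn]
          refine hchinv _ hjm (Or.inl ?_)
          rw [← hyc]; exact hc4 y hy
        · have hju : j ≠ pvCell m u → ch1.getD j [] = [] := by
            intro hyn
            rw [hch1_ne _ hyn]
            rcases hj with h | h
            · exact hchinv _ hjm (Or.inl (hvis1_false _ h))
            · rw [List.map_append] at h
              rcases List.mem_append.mp h with h | h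
              · rw [List.map_reverse, List.mem_reverse] at h
                exact absurd h hjq
              · exact hchinv _ hjm (Or.inr (by simp [h]))
          by_cases hyn : j = pvCell m u
          · subst hyn
            rcases hj with h | h
            · rw [hvis1_u] at h; simp at h
            · rw [List.map_append] at h
              rcases List.mem_append.mp h with h | h
              · rw [List.map_reverse, List.mem_reverse] at h
                exact absurd h hjq
              · obtain ⟨y, hy, hyc⟩ := List.mem_map.mp h
                exact absurd (by rw [← hyc]; exact List.mem_map_of_mem hy) hcu_rest
          · exact hju hyn
      have hfuel' : (cs.reverse ++ rest).length + pvCF vis1 ≤ f := by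
        simp only [List.length_cons] at hfuel
        simp only [List.length_append, List.length_reverse]
        omega
      have hg' : pvCF vis1 < g := by omega
      obtain ⟨ih1, ih2, ih3, ih4, ih5, ih6⟩ :=
        ih (cs.reverse ++ rest) vis1 par' ch1 hc1 hch1_len hrange' hnodup' hmarked' hchinv'
          hfuel' hg'
      set r' := pvLoopA adj f (cs.reverse ++ rest) vis1 par' ch1 [] with hr'_def
      have hordsplit : pvLoopA adj f (cs.reverse ++ rest) vis1 par' ch1 ([] ++ [u]) =
          (r'.1, r'.2.1, r'.2.2.1, ([] ++ [u]) ++ r'.2.2.2) := pvLoopA_ord adj f _ _ _ _ _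
      rw [hordsplit] at hstep
      simp only [List.nil_append] at hstep
      rw [hstep]
      dsimp only
      simp only [List.singleton_append]
      -- key facts
      have hcu_nP' : pvCell m u ∉ r'.2.2.2.map (pvCell m) := by
        intro hmem
        obtain ⟨x, hx, hxc⟩ := List.mem_map.mp hmem
        rcases (ih4 x hx).2 with h | h
        · rw [hxc, List.map_append] at h
          rcases List.mem_append.mp h with h | h
          · rw [List.map_reverse, List.mem_reverse] at h
            exact hnot_cs_u h
          · exact hcu_rest h
        · rw [hxc, hvis1_u] at h; simp at h
      have hchfu : r'.2.2.1.getD (pvCell m u) [] = cs := by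
        rw [ih5 _ hcu hcu_nP', hch1_u]
      -- dfs unfolding at u
      have hdfsu : pvDfs adj g u vis =
          (pvComb (PySem.List.sorted (pvDfsL adj g cs.reverse vis1).1 (fun x => x) false),
           (pvDfsL adj g cs.reverse vis1).2) := by
        obtain ⟨g0, rfl⟩ : ∃ g0, g = g0 + 1 := ⟨g - 1, by omega⟩
        rw [pvDfs_succ]
        rw [← hcs_def, ← hvis1_def]
        by_cases hcsq : cs = []
        · rw [hcsq]; simp [pvDfsL_nil]
        · have hlen1 : 0 < cs.length := List.length_pos_of_ne_nil hcsq
          have heq : pvDfsL adj g0 cs.reverse vis1 = pvDfsL adj (g0 + 1) cs.reverse vis1 :=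
            pvDfsL_fuel adj m hadj g0 (g0 + 1) _ _ hc1 (by omega) (by omega)
          rw [← heq]
      have hq1len : (pvDfsL adj g cs.reverse vis1).1.length = cs.length := by
        rw [pvDfsL_length]; simp
      refine ⟨?_, ih2, ih3, ?_, ?_, ?_⟩
      · rw [ih1, pvDfsL_cons, hdfsu, pvDfsL_append]
      · intro x hx
        rcases List.mem_cons.mp hx with h | h
        · subst h
          exact ⟨hu, Or.inl (by simp)⟩
        · obtain ⟨hxr, hxc⟩ := ih4 x h
          refine ⟨hxr, ?_⟩
          rcases hxc with h' | h'
          · rw [List.map_append] at h'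
            rcases List.mem_append.mp h' with h2 | h2
            · rw [List.map_reverse, List.mem_reverse] at h2
              obtain ⟨y, hy, hyc⟩ := List.mem_map.mp h2
              exact Or.inr (by rw [← hyc]; exact hc4 y hy)
            · exact Or.inl (by simp [h2])
          · exact Or.inr (hvis1_false _ h')
      · intro j hjm hj
        simp only [List.map_cons, List.mem_cons, not_or] at hj
        rw [ih5 _ hjm hj.2, hch1_ne _ hj.1]
      · intro hv hhv
        obtain ⟨jh1, jh2, jh3⟩ := ih6 hv hhv
        have hrevsplit : (u :: r'.2.2.2).reverse = r'.2.2.2.reverse ++ [u] := by simp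
        rw [hrevsplit, List.foldl_append]
        set hv1 := r'.2.2.2.reverse.foldl (pvHashStepA r'.2.2.1) hv with hv1_def
        simp only [List.foldl_cons, List.foldl_nil]
        -- evaluate the hash step at u
        have hgetchf : PySem.List.pyGetD r'.2.2.1 u [] = cs := by
          rw [pvGetD_cell (by rw [ih3]; exact hu), ih3]
          exact hchfu
        have hreads : cs.map (fun c => PySem.List.pyGetD hv1 c 0) =
            (pvDfsL adj g cs.reverse vis1).1.reverse := by
          have hmapsplit := jh3
          rw [pvDfsL_append] at hmapsplit
          dsimp only at hmapsplit
          rw [List.map_append] at hmapsplit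
          have hinj := List.append_inj hmapsplit (by rw [hq1len]; simp)
          have h1 : cs.reverse.map (fun x => hv1.getD (pvCell m x) 0) =
              (pvDfsL adj g cs.reverse vis1).1 := hinj.1
          rw [List.map_reverse] at h1
          rw [show cs.map (fun c => PySem.List.pyGetD hv1 c 0) =
              cs.map (fun x => hv1.getD (pvCell m x) 0) from ?_]
          · rw [← h1, List.reverse_reverse]
          · refine List.map_congr_left ?_
            intro x hx
            rw [pvGetD_cell (show PySem.Raise.InRange hv1.length x from by
              rw [jh1]; exact pvNbrs adj m hadj u x (hc6 x hx)), jh1]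
        have hvalstep : pvHashStepA r'.2.2.1 hv1 u =
            hv1.set (pvCell m u) (pvComb (PySem.List.sorted
              (pvDfsL adj g cs.reverse vis1).1 (fun x => x) false)) := by
          unfold pvHashStepA
          rw [hgetchf]
          have hsort : PySem.List.sorted (cs.map (fun c => PySem.List.pyGetD hv1 c 0))
              (fun x => x) false =
              PySem.List.sorted (pvDfsL adj g cs.reverse vis1).1 (fun x => x) false := by
            rw [hreads]
            exact PySem.List.sorted_eq_sorted_of_perm _ _ _ (fun a b h => h)
              (List.reverse_perm _)
          by_cases hcsq : cs = []
          · rw [if_pos hcsq]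
            have hq1nil : (pvDfsL adj g cs.reverse vis1).1 = [] := by
              refine List.eq_nil_of_length_eq_zero ?_
              rw [hq1len, hcsq]
              rfl
            rw [hq1nil]
            rw [pvSetD_cell (by rw [jh1]; exact hu), jh1]
            rfl
          · rw [if_neg hcsq]
            rw [hsort, pvSetD_cell (by rw [jh1]; exact hu), jh1]
            rfl
        rw [hvalstep]
        have hvlen1 : hv1.length = m := jh1
        refine ⟨by simpa using hvlen1, ?_, ?_⟩
        · intro j hjm hj
          simp only [List.map_cons, List.mem_cons, not_or] at hj
          rw [pvGetD_set_ne (fun h => hj.1 h.symm), jh2 _ hjm hj.2]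
        · rw [List.map_cons]
          rw [pvDfsL_cons, hdfsu]
          congr 1
          · exact pvGetD_set_self (by rw [hvlen1]; exact hcu)
          · have hresteq : rest.map (fun x =>
                (hv1.set (pvCell m u) (pvComb (PySem.List.sorted
                  (pvDfsL adj g cs.reverse vis1).1 (fun x => x) false))).getD (pvCell m x) 0) =
                rest.map (fun x => hv1.getD (pvCell m x) 0) := by
              refine List.map_congr_left ?_
              intro x hx
              refine pvGetD_set_ne ?_
              intro h
              exact absurd (h ▸ List.mem_map_of_mem hx) hcu_rest
            rw [hresteq]
            have hmapsplit := jh3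
            rw [pvDfsL_append] at hmapsplit
            dsimp only at hmapsplit
            rw [List.map_append] at hmapsplit
            exact (List.append_inj hmapsplit (by rw [hq1len]; simp)).2

-- ---- MAIN LEMMA, B side ----

def pvTodoOf : List Int → List (Int × List Int × List Int) → List (Int × Bool)
  | l, [] => l.map (fun v => (v, true))
  | l, (u, l', _) :: segs => l.map (fun v => (v, true)) ++ (u, false) :: pvTodoOf l' segs

def pvEnters : List Int → List (Int × List Int × List Int) → Nat
  | l, [] => l.length
  | l, (_, l', _) :: segs => l.length + pvEnters l' segs

def pvFinalB (adj : List (List Int)) (g : Nat) :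
    List Int → List Int → List (Int × List Int × List Int) → List Bool → List Int × List Bool
  | l, a, [], vis => (a ++ (pvDfsL adj g l vis).1, (pvDfsL adj g l vis).2)
  | l, a, (_, l', a') :: segs, vis =>
    pvFinalB adj g l'
      (a' ++ [pvComb (PySem.List.sorted (a ++ (pvDfsL adj g l vis).1) (fun x => x) false)])
      segs (pvDfsL adj g l vis).2

lemma pvTodoOf_cons (v : Int) (l : List Int) (segs : List (Int × List Int × List Int)) :
    pvTodoOf (v :: l) segs = (v, true) :: pvTodoOf l segs := by
  cases segs <;> simp [pvTodoOf]

lemma pvTodoOf_length :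
    ∀ (segs : List (Int × List Int × List Int)) (l : List Int),
      (pvTodoOf l segs).length = pvEnters l segs + segs.length := by
  intro segs
  induction segs with
  | nil => intro l; simp [pvTodoOf, pvEnters]
  | cons s segs ih =>
    intro l
    cases s with
    | mk u rest => cases rest with
      | mk l2 a2 => simp [pvTodoOf, pvEnters, ih]; omega

lemma pvEnters_cons (v : Int) (l : List Int) (segs : List (Int × List Int × List Int)) :
    pvEnters (v :: l) segs = pvEnters l segs + 1 := by
  cases segs with
  | nil => simp [pvEnters]
  | cons s segs => cases s with
    | mk u rest => cases rest with
      | mk l2 a2 => simp [pvEnters]; omega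

lemma pvFinalB_cons (adj : List (List Int)) (g : Nat) (v : Int) (l a : List Int)
    (segs : List (Int × List Int × List Int)) (vis : List Bool) :
    pvFinalB adj g (v :: l) a segs vis =
      pvFinalB adj g l (a ++ [(pvDfs adj g v vis).1]) segs (pvDfs adj g v vis).2 := by
  cases segs with
  | nil => simp [pvFinalB, pvDfsL_cons]
  | cons s segs => cases s with
    | mk u rest => cases rest with
      | mk l' a' => simp [pvFinalB, pvDfsL_cons]

lemma pvLoopB_main (adj : List (List Int)) (m : Nat)
    (hadj : ∀ lst ∈ adj, ∀ v ∈ lst, PySem.Raise.InRange m v) (g : Nat) :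
    ∀ (f : Nat) (l a : List Int) (segs : List (Int × List Int × List Int)) (vis : List Bool),
      vis.length = m →
      (pvTodoOf l segs).length + pvEnters l segs + 2 * pvCF vis ≤ f →
      pvCF vis < g →
      pvLoopB adj f (pvTodoOf l segs) vis (a :: segs.map (fun s => s.2.2)) =
        ((pvFinalB adj g l a segs vis).2, [(pvFinalB adj g l a segs vis).1]) := by
  intro f
  induction f with
  | zero =>
    intro l a segs vis hm hf hg
    rcases l with _ | ⟨v, l'⟩
    · rcases segs with _ | ⟨⟨u, l', a'⟩, segs⟩
      · simp [pvLoopB, pvFinalB, pvDfsL_nil]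
      · rw [pvTodoOf_length] at hf
        simp [pvEnters] at hf
    · rw [pvTodoOf_length] at hf
      rcases segs with _ | s <;> simp [pvEnters] at hf
  | succ f ih =>
    intro l a segs vis hm hf hg
    rcases l with _ | ⟨v, l'⟩
    · rcases segs with _ | ⟨⟨u, lu, au⟩, segs⟩
      · simp [pvTodoOf, pvLoopB, pvFinalB, pvDfsL_nil]
      · show pvLoopB adj (f + 1) ((u, false) :: pvTodoOf lu segs) vis
            (a :: au :: segs.map (fun s => s.2.2)) = _
        rw [pvLoopB]
        simp only [Bool.false_eq_true, if_false]
        have hcomb : pvComb (PySem.List.sorted a (fun x => x) false) =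
            List.foldl (fun h c => PySem.Int.mod (h * 31 + c) 1000000007) 1
              (PySem.List.sorted a (fun x => x) false) := rfl
        rw [← hcomb,
          ih lu (au ++ [pvComb (PySem.List.sorted a (fun x => x) false)]) segs vis hm
          (by rw [pvTodoOf_length] at hf ⊢
              simp only [pvEnters, List.length_nil, List.length_cons] at hf ⊢
              omega) hg]
        show _ = ((pvFinalB adj g [] a ((u, lu, au) :: segs) vis).2,
          [(pvFinalB adj g [] a ((u, lu, au) :: segs) vis).1])
        simp [pvFinalB, pvDfsL_nil, pvComb]
    · rw [pvTodoOf_cons]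
      rw [pvLoopB]
      simp only [if_true]
      rw [pvInnerB]
      rw [show List.foldl pvMark ([], vis) (PySem.List.pyGetD adj v []) = pvCollect adj v vis
        from rfl]
      obtain ⟨hc1, _, _, _, _, _, hc7⟩ :=
        pvCollect_spec m (PySem.List.pyGetD adj v []) vis hm (pvNbrs adj m hadj v)
      have hc1' : (pvCollect adj v vis).2.length = m := hc1
      have hc7' : pvCF (pvCollect adj v vis).2 + (pvCollect adj v vis).1.length = pvCF vis := hc7
      have htodo : (pvCollect adj v vis).1.reverse.map (fun v => (v, true)) ++
          (v, false) :: pvTodoOf l' segs =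
          pvTodoOf (pvCollect adj v vis).1.reverse ((v, l', a) :: segs) := by
        simp [pvTodoOf]
      have hfr : ([] : List Int) :: a :: segs.map (fun s => s.2.2) =
          ([] : List Int) :: ((v, l', a) :: segs).map (fun s => s.2.2) := by simp
      rw [show ((pvCollect adj v vis).1.reverse.map (fun v => (v, true)) ++
          (v, false) :: pvTodoOf l' segs) = pvTodoOf (pvCollect adj v vis).1.reverse
            ((v, l', a) :: segs) from htodo]
      show pvLoopB adj f (pvTodoOf (pvCollect adj v vis).1.reverse ((v, l', a) :: segs))
          (pvCollect adj v vis).2 ([] :: List.map (fun s => s.2.2) ((v, l', a) :: segs)) =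
        ((pvFinalB adj g (v :: l') a segs vis).2, [(pvFinalB adj g (v :: l') a segs vis).1])
      rw [ih (pvCollect adj v vis).1.reverse [] ((v, l', a) :: segs) (pvCollect adj v vis).2 hc1'
        (by
          rw [pvTodoOf_length] at hf ⊢
          rw [pvEnters_cons] at hf
          simp only [pvEnters, List.length_cons, List.length_reverse] at hf ⊢
          omega)
        (by omega)]
      have hdfs : pvDfs adj g v vis =
          (pvComb (PySem.List.sorted
            (pvDfsL adj g (pvCollect adj v vis).1.reverse (pvCollect adj v vis).2).1
            (fun x => x) false),
           (pvDfsL adj g (pvCollect adj v vis).1.reverse (pvCollect adj v vis).2).2) := by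
        obtain ⟨g', rfl⟩ : ∃ g', g = g' + 1 := ⟨g - 1, by omega⟩
        rw [pvDfs_succ]
        rcases hcs : (pvCollect adj v vis).1 with _ | ⟨c0, cs0⟩
        · simp [pvDfsL_nil]
        · have : pvDfsL adj g' (pvCollect adj v vis).1.reverse (pvCollect adj v vis).2 =
              pvDfsL adj (g' + 1) (pvCollect adj v vis).1.reverse (pvCollect adj v vis).2 := by
            refine pvDfsL_fuel adj m hadj g' (g' + 1) _ _ hc1' ?_ ?_ <;>
              · rw [hcs] at hc7'; simp at hc7'; omega
          rw [← hcs, this]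
      rw [pvFinalB_cons, hdfs]
      show ((pvFinalB adj g (pvCollect adj v vis).1.reverse []
          ((v, l', a) :: segs) (pvCollect adj v vis).2).2, _) = _
      rw [pvFinalB]
      simp

-- ---- adjacency facts ----

lemma pvAdjA_forall (P : Int → Prop) (edges : List (Int × Int)) (n : Int)
    (hE : ∀ e ∈ edges, P e.1 ∧ P e.2) :
    ∀ lst ∈ pvAdjA n edges, ∀ v ∈ lst, P v := by
  have main : ∀ (es : List (Int × Int)) (adj : List (List Int)),
      (∀ lst ∈ adj, ∀ v ∈ lst, P v) → (∀ e ∈ es, P e.1 ∧ P e.2) →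
      ∀ lst ∈ es.foldl (fun adj e =>
        let adj1 := PySem.List.pySetD adj e.1 (PySem.List.pyGetD adj e.1 [] ++ [e.2])
        PySem.List.pySetD adj1 e.2 (PySem.List.pyGetD adj1 e.2 [] ++ [e.1])) adj,
        ∀ v ∈ lst, P v := by
    intro es
    induction es with
    | nil => intro adj hadj _; simpa using hadj
    | cons e es ih =>
      intro adj hadj hE
      simp only [List.foldl_cons]
      refine ih _ ?_ (fun e' he' => hE e' (by simp [he']))
      intro lst hlst v hv
      have h1 : ∀ lst ∈ PySem.List.pySetD adj e.1
          (PySem.List.pyGetD adj e.1 [] ++ [e.2]), ∀ v ∈ lst, P v := by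
        intro lst hlst v hv
        rcases pvMem_pySetD hlst with h | h
        · exact hadj lst h v hv
        · subst h
          rcases List.mem_append.mp hv with h | h
          · rcases pvGetD_mem_or adj e.1 ([] : List Int) with h' | h'
            · exact hadj _ h' v h
            · rw [h'] at h; simp at h
          · simp only [List.mem_singleton] at h; subst h
            exact (hE e (by simp)).2
      rcases pvMem_pySetD hlst with h | h
      · exact h1 lst h v hv
      · subst h
        rcases List.mem_append.mp hv with h | h
        · rcases pvGetD_mem_or (PySem.List.pySetD adj e.1
            (PySem.List.pyGetD adj e.1 [] ++ [e.2])) e.2 ([] : List Int) with h' | h'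
          · exact h1 _ h' v h
          · rw [h'] at h; simp at h
        · simp only [List.mem_singleton] at h; subst h
          exact (hE e (by simp)).1
  refine main edges _ ?_ hE
  intro lst hlst
  rw [List.eq_of_mem_replicate hlst]
  simp

-- ---- top-level assembly ----


-- ===== VERDICT (by name: the statement is the Claim_ definition above) =====
lemma pvMainEq (n : Int) (edges : List (Int × Int)) (root : Int)
    (hn : 1 ≤ n) (hroot : PySem.Raise.InRange n.toNat root)
    (hedges : ∀ e ∈ edges, PySem.Raise.InRange n.toNat e.1 ∧ PySem.Raise.InRange n.toNat e.2) :
    tree_hash n edges root = tree_hash_alt n edges root := by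
  have hn0 : ¬ n = 0 := by omega
  set m := n.toNat with hm_def
  have hm1 : 1 ≤ m := by omega
  set adj := pvAdjA n edges with hadj_def
  have hadj : ∀ lst ∈ adj, ∀ v ∈ lst, PySem.Raise.InRange m v :=
    pvAdjA_forall (fun v => PySem.Raise.InRange m v) edges n hedges
  set vis0 := PySem.List.pySetD (List.replicate m false) root true with hvis0_def
  have hrep_len : (List.replicate m (false : Bool)).length = m := by simp
  have hroot' : PySem.Raise.InRange (List.replicate m (false : Bool)).length root := by
    rw [hrep_len]; exact hroot
  have hcroot : pvCell m root < m := pvCell_lt hroot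
  have hvis0_cell : vis0 = (List.replicate m false).set (pvCell m root) true := by
    rw [hvis0_def, pvSetD_cell hroot', hrep_len]
  have hvis0_len : vis0.length = m := by rw [hvis0_cell]; simp
  have hrep_cnt : (List.replicate m (false : Bool)).count false = m := by simp
  have hcf0 : pvCF vis0 + 1 = m := by
    rw [hvis0_cell]
    unfold pvCF
    rw [pvCount_set_true (by rw [hrep_len]; exact hcroot) (pvGetD_replicate hcroot), hrep_cnt]
  have hmark0 : vis0.getD (pvCell m root) true = true := by
    rw [hvis0_cell]; exact pvGetD_set_self (by rw [hrep_len]; exact hcroot)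
  obtain ⟨ah1, ah2, ah3, ah4, ah5, ah6⟩ :=
    pvLoopA_main adj m hadj m m [root] vis0 (List.replicate m (-1)) (List.replicate m [])
      hvis0_len (by simp)
      (by intro x hx; simp at hx; subst hx; exact hroot)
      (by simp)
      (by intro x hx; simp at hx; subst hx; exact hmark0)
      (by intro j hj _; exact pvGetD_replicate hj)
      (by simp; omega) (by omega)
  obtain ⟨bh1, bh2, bh3⟩ := ah6 (List.replicate m 0) (by simp)
  -- the common value
  have hAval : tree_hash n edges root =
      (pvDfs adj m root vis0).1 := by
    simp only [tree_hash, if_neg hn0]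
    rw [← hadj_def, ← hvis0_def, ← hm_def]
    have hlen : ((pvLoopA adj m [root] vis0 (List.replicate m (-1))
        (List.replicate m []) []).2.2.2.reverse.foldl
          (pvHashStepA (pvLoopA adj m [root] vis0 (List.replicate m (-1))
            (List.replicate m []) []).2.2.1) (List.replicate m 0)).length = m := bh1
    rw [pvGetD_cell (by rw [hlen]; exact hroot), hlen]
    have := bh3
    rw [pvDfsL_cons, pvDfsL_nil] at this
    simp only [List.map_cons, List.map_nil] at this
    exact (List.cons_eq_cons.mp this).1
  have hBval : tree_hash_alt n edges root =
      (pvDfs adj m root vis0).1 := by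
    simp only [tree_hash_alt, if_neg hn0]
    rw [← hadj_def, ← hvis0_def]
    have hB := pvLoopB_main adj m hadj m (2 * n).toNat [root] [] [] vis0 hvis0_len
      (by rw [pvTodoOf_length]
          simp only [pvEnters, List.length_cons, List.length_nil]
          omega)
      (by omega)
    rw [show pvTodoOf [root] [] = [(root, true)] from rfl] at hB
    rw [show ([] : List Int) :: List.map (fun s => s.2.2)
        ([] : List (Int × List Int × List Int)) = [[]] from rfl] at hB
    rw [hB]
    show ((pvFinalB adj m [root] [] [] vis0).1).headD 0 = _
    rw [show pvFinalB adj m [root] [] [] vis0 =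
        ([] ++ (pvDfsL adj m [root] vis0).1, (pvDfsL adj m [root] vis0).2) from rfl]
    rw [pvDfsL_cons, pvDfsL_nil]
    simp
  rw [hAval, hBval]

theorem tree_hash_spec : Claim_equal_tree_hash := by
  intro n edges root hdom hpre
  unfold Spec_tree_hash
  rcases hpre with h0 | ⟨hn, hroot, hedges⟩
  · subst h0
    simp [tree_hash, tree_hash_alt]
  · exact pvMainEq n edges root hn hroot hedges
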